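-- pv_equiv track=rewrite | github.com/Woijech/HIS | lab2/logiclab/domain/analysis.py | _anf_coefficients
-- ===== SOURCE A (Python) =====
-- from typing import Dict, Iterable, List, Mapping, Sequence, Tuple
--
-- def _anf_coefficients(vector: Sequence[int]) -> List[int]:
--     coeffs = list(vector)
--     size = len(coeffs)
--     step = 1
--     while step < size:
--         for mask in range(size):
--             if mask & step:
--                 coeffs[mask] ^= coeffs[mask ^ step]
--         step <<= 1
--     return coeffs
-- ===== SOURCE B (Python) =====
-- from typing import List, Sequence
--
--
-- def _anf_coefficients(vector: Sequence[int]) -> List[int]: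
--     values = list(vector)
--     size = len(values)
--     result = []
--     for mask in range(size):
--         acc = 0
--         for s in range(mask + 1):
--             if s & mask == s:
--                 acc ^= values[s]
--         result.append(acc)
--     return result
-- ===== Notes on version B (the rewrite author's own statement) =====
-- stated objective: simpler
-- what changed: Replaces the in-place butterfly (Moebius) passes over bit-planes by a direct stateless computation of each ANF coefficient as the XOR of the original vector over the submasks of its index.
import Mathlib
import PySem

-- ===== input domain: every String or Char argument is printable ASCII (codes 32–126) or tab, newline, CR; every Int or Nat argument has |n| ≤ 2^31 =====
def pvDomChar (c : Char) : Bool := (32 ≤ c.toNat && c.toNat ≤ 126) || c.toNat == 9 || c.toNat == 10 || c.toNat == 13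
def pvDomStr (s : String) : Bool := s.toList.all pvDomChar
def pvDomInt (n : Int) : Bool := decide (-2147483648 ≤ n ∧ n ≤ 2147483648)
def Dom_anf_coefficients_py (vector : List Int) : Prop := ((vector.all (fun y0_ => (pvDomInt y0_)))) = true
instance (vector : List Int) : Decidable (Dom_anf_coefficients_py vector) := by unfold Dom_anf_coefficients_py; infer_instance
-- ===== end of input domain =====

-- B replaces A's in-place Möbius bit-plane passes by a direct, stateless computation of each
-- coefficient as the XOR of the original vector over the submasks of its index (simpler, no cross-pass state).

-- ===== PORT A =====
-- one pass of the while-loop body: `for mask in range(size): if mask & step: coeffs[mask] ^= coeffs[mask ^ step]`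
def anfPass (cs : List Int) (size step : Nat) : List Int :=
  (List.range size).foldl
    (fun acc mask =>
      if mask &&& step ≠ 0 then
        acc.set mask (PySem.Int.bxor (acc.getD mask 0) (acc.getD (mask ^^^ step) 0))
      else acc) cs

-- the `while step < size` loop; step starts at 1 and is doubled (`step <<= 1`), so it stays positive
def anfLoop (cs : List Int) (size step : Nat) (h : 0 < step) : List Int :=
  if hs : step < size then
    anfLoop (anfPass cs size step) size (step <<< 1)
      (by simp only [Nat.shiftLeft_eq, pow_one]; omega)
  else cs
termination_by size - step
decreasing_by simp only [Nat.shiftLeft_eq, pow_one]; omega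

def anf_coefficients_py (vector : List Int) : List Int :=
  anfLoop vector vector.length 1 Nat.one_pos

-- ===== PORT B =====
-- `acc = 0; for s in range(mask+1): if s & mask == s: acc ^= values[s]`
def anfDirect (values : List Int) (mask : Nat) : Int :=
  (List.range (mask + 1)).foldl
    (fun acc s => if s &&& mask = s then PySem.Int.bxor acc (values.getD s 0) else acc) 0

def anf_coefficients_py_alt (vector : List Int) : List Int :=
  (List.range vector.length).map (fun mask => anfDirect vector mask)

-- ===== PRECONDITION & SPEC =====
def Spec_anf_coefficients_py (vector : List Int) (out : List Int) : Prop := out = anf_coefficients_py_alt vector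
instance (vector : List Int) (out : List Int) : Decidable (Spec_anf_coefficients_py vector out) := by unfold Spec_anf_coefficients_py; infer_instance

-- ===== CLAIM (what is proved, stated in full; the proofs are below) =====
def Claim_equal_anf_coefficients_py : Prop := ∀ (vector : List Int), Dom_anf_coefficients_py vector → Spec_anf_coefficients_py vector (anf_coefficients_py vector)

-- ===== LEMMAS AND PROOFS =====

-- XOR algebra ------------------------------------------------------------
theorem bxor_eq_int_xor (a b : Int) : PySem.Int.bxor a b = Int.xor a b := by
  rcases a with m | m <;> rcases b with n | n <;>
    simp [PySem.Int.bxor, Int.xor, Int.negSucc_eq] <;> omega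

theorem bxor_assoc (a b c : Int) :
    PySem.Int.bxor (PySem.Int.bxor a b) c = PySem.Int.bxor a (PySem.Int.bxor b c) := by
  simp only [bxor_eq_int_xor]
  rcases a with m | m <;> rcases b with n | n <;> rcases c with p | p <;>
    simp [Int.xor, Nat.xor_assoc]

theorem zero_bxor (a : Int) : PySem.Int.bxor 0 a = a := by
  rw [PySem.Int.bxor_comm]; exact PySem.Int.bxor_zero a

theorem bxor_left_comm (a b c : Int) :
    PySem.Int.bxor a (PySem.Int.bxor b c) = PySem.Int.bxor b (PySem.Int.bxor a c) := by
  rw [← bxor_assoc, PySem.Int.bxor_comm a b, bxor_assoc]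

-- xor-sum of a list
def bx (l : List Int) : Int := l.foldl PySem.Int.bxor 0

theorem foldl_bxor_acc (l : List Int) (a : Int) :
    l.foldl PySem.Int.bxor a = PySem.Int.bxor a (bx l) := by
  induction l generalizing a with
  | nil => simp [bx, PySem.Int.bxor_zero]
  | cons x l ih =>
    simp only [bx, List.foldl_cons] at *
    rw [ih, ih (PySem.Int.bxor 0 x), zero_bxor, bxor_assoc]

theorem bx_cons (x : Int) (l : List Int) : bx (x :: l) = PySem.Int.bxor x (bx l) := by
  simp only [bx, List.foldl_cons, zero_bxor]
  exact foldl_bxor_acc l x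

-- splitting an xor-sum over a filter into two disjoint filters
theorem bx_split (l : List Nat) (f : Nat → Int) (p p1 p2 : Nat → Bool)
    (hu : ∀ s, p s = (p1 s || p2 s)) (hd : ∀ s, ¬(p1 s = true ∧ p2 s = true)) :
    bx ((l.filter p).map f) =
      PySem.Int.bxor (bx ((l.filter p1).map f)) (bx ((l.filter p2).map f)) := by
  induction l with
  | nil => simp [bx]
  | cons s l ih =>
    by_cases h1 : p1 s = true
    · have h2 : p2 s = false := by have := hd s; cases hp2 : p2 s <;> simp_all
      have hp : p s = true := by rw [hu]; simp [h1]
      simp only [List.filter_cons, h1, hp, h2, List.map_cons, Bool.false_eq_true, ite_false,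
        ite_true]
      rw [bx_cons, bx_cons, ih, bxor_assoc]
    · by_cases h2 : p2 s = true
      · have hp : p s = true := by rw [hu]; simp [h2]
        simp only [List.filter_cons, h1, hp, h2, List.map_cons, Bool.false_eq_true,
          ite_false, ite_true]
        rw [bx_cons, bx_cons, ih, bxor_left_comm]
      · have hp : p s = false := by
          rw [hu]; cases hq1 : p1 s <;> cases hq2 : p2 s <;> simp_all
        simp only [List.filter_cons, h1, hp, h2, Bool.false_eq_true, ite_false]
        exact ih

-- submask / bit facts ----------------------------------------------------
theorem submask_iff (s mask : Nat) :
    s &&& mask = s ↔ ∀ i, s.testBit i = true → mask.testBit i = true := by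
  constructor
  · intro h i hi
    have := congrArg (fun x => x.testBit i) h
    simp only [Nat.testBit_and, hi, Bool.true_and] at this
    exact this
  · intro h
    apply Nat.eq_of_testBit_eq
    intro i
    rw [Nat.testBit_and]
    cases hs : s.testBit i
    · simp
    · simp [h i hs]

theorem lt_two_pow_iff (x k : Nat) : x < 2 ^ k ↔ ∀ i, k ≤ i → x.testBit i = false := by
  constructor
  · intro h i hik
    exact Nat.testBit_lt_two_pow (lt_of_lt_of_le h (Nat.pow_le_pow_right (by norm_num) hik))
  · intro h
    exact Nat.lt_pow_two_of_testBit x h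

theorem and_two_pow_ne_zero_iff (i k : Nat) : (i &&& 2 ^ k ≠ 0) ↔ i.testBit k = true := by
  rw [Nat.and_two_pow]
  cases h : i.testBit k <;> simp [Nat.pow_eq_zero]

theorem xor_two_pow_lt {i k : Nat} (h : i.testBit k = true) : i ^^^ 2 ^ k < i := by
  apply Nat.lt_of_testBit k
  · simp [Nat.testBit_xor, h]
  · exact h
  · intro j hj
    simp [Nat.testBit_xor, Nat.testBit_two_pow, decide_eq_false (by omega : ¬ k = j)]

theorem submask_xor_le {s i : Nat} (h : s &&& i = s) : i ^^^ s ≤ i := by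
  have hsub := (submask_iff s i).mp h
  calc i ^^^ s = (i ^^^ s) &&& i := by
        apply (Nat.eq_of_testBit_eq _)
        intro j
        rw [Nat.testBit_and, Nat.testBit_xor]
        cases hs : s.testBit j
        · cases i.testBit j <;> simp
        · simp [hsub j hs]
    _ ≤ i := Nat.and_le_right

-- the intermediate value after processing bit-planes 2^0 .. 2^(k-1)
def G (v : List Int) (k mask : Nat) : Int :=
  bx (((List.range v.length).filter
        (fun s => (s &&& mask == s) && decide (mask ^^^ s < 2 ^ k))).map (fun s => v.getD s 0))

theorem filter_range_sub (p : Nat → Bool) (m n : Nat) (hmn : m ≤ n)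
    (h : ∀ s, p s = true → s < m) :
    (List.range n).filter p = (List.range m).filter p := by
  induction n with
  | zero => have : m = 0 := by omega
            rw [this]
  | succ n ih =>
    by_cases hm : m = n + 1
    · rw [hm]
    · have hmn' : m ≤ n := by omega
      rw [List.range_succ, List.filter_append, ih hmn']
      have hpn : p n = false := by
        cases hp : p n
        · rfl
        · exact absurd (h n hp) (by omega)
      simp [hpn]

theorem bx_single (x : Int) : bx [x] = x := by
  rw [bx_cons]; simp [bx, PySem.Int.bxor_zero]

theorem G_zero (v : List Int) : (List.range v.length).map (G v 0) = v := by
  apply List.ext_getElem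
  · simp
  · intro i h1 h2
    simp only [List.getElem_map, List.getElem_range]
    unfold G
    have hcong : (List.range v.length).filter
        (fun s => (s &&& i == s) && decide (i ^^^ s < 2 ^ 0)) =
        (List.range v.length).filter (fun s => s == i) := by
      apply List.filter_congr
      intro s _
      by_cases hsi : s = i
      · subst hsi; simp [Nat.and_self, Nat.xor_self]
      · have hd : i ≠ s := fun h => hsi h.symm
        simp [hsi, hd]
    rw [hcong, List.filter_beq, List.count_range, if_pos h2, List.replicate_one,
      List.map_singleton, bx_single, List.getD_eq_getElem v 0 h2]

theorem anfDirect_eq_bx (v : List Int) (i : Nat) :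
    anfDirect v i = bx (((List.range (i + 1)).filter (fun s => s &&& i == s)).map
      (fun s => v.getD s 0)) := by
  unfold anfDirect bx
  rw [List.foldl_map, List.foldl_filter]
  apply PySem.List.foldl_congr_mem
  intro acc s _
  by_cases hs : s &&& i = s <;> simp [hs]

theorem G_final (v : List Int) (k i : Nat) (hi : i < v.length) (hk : v.length ≤ 2 ^ k) :
    G v k i = anfDirect v i := by
  unfold G
  have hcong : (List.range v.length).filter
      (fun s => (s &&& i == s) && decide (i ^^^ s < 2 ^ k)) =
      (List.range v.length).filter (fun s => s &&& i == s) := by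
    apply List.filter_congr
    intro s _
    by_cases hs : s &&& i = s
    · have hlt : i ^^^ s < 2 ^ k := by
        have := submask_xor_le hs
        omega
      simp [hs, hlt]
    · simp [hs]
  rw [hcong, filter_range_sub (fun s => s &&& i == s) (i + 1) v.length (by omega)
      (fun s hp => by
        have hs : s &&& i = s := by simpa using hp
        have := Nat.and_le_right (n := s) (m := i)
        omega),
    ← anfDirect_eq_bx]

theorem G_succ_bit_false (v : List Int) (k i : Nat) (hb : i.testBit k = false) :
    G v (k + 1) i = G v k i := by
  unfold G
  congr 1
  congr 1
  apply List.filter_congr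
  intro s _
  by_cases hs : s &&& i = s
  · have hiff : i ^^^ s < 2 ^ (k + 1) ↔ i ^^^ s < 2 ^ k := by
      constructor
      · intro h
        apply (lt_two_pow_iff _ _).mpr
        intro j hj
        rcases Nat.eq_or_lt_of_le hj with hj' | hj'
        · have hsb : s.testBit k = false := by
            cases hsb : s.testBit k
            · rfl
            · exact absurd ((submask_iff s i).mp hs k hsb) (by rw [hb]; simp)
          rw [← hj', Nat.testBit_xor, hb, hsb]
          rfl
        · exact (lt_two_pow_iff _ _).mp h j (by omega)
      · intro h
        have : (2:Nat) ^ k ≤ 2 ^ (k + 1) := Nat.pow_le_pow_right (by norm_num) (by omega)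
        omega
    have e1 : (s &&& i == s) = true := by simpa using hs
    rw [e1, Bool.true_and, Bool.true_and, decide_eq_decide]
    exact hiff
  · have e1 : (s &&& i == s) = false := by simpa using hs
    rw [e1, Bool.false_and, Bool.false_and]

theorem G_succ_bit_true (v : List Int) (k i : Nat) (hb : i.testBit k = true) :
    G v (k + 1) i = PySem.Int.bxor (G v k i) (G v k (i ^^^ 2 ^ k)) := by
  unfold G
  apply bx_split
  · -- union
    intro s
    have hi'bit : ∀ j, (i ^^^ 2 ^ k).testBit j = ((i.testBit j) ^^ decide (k = j)) := by
      intro j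
      simp [Nat.testBit_xor, Nat.testBit_two_pow]
    cases hsi : s.testBit k
    · -- s has bit k clear: p1 s = false, p s = p2 s
      have hp1 : ((s &&& i == s) && decide (i ^^^ s < 2 ^ k)) = false := by
        by_cases hs : s &&& i = s
        · have hbit : (i ^^^ s).testBit k = true := by
            rw [Nat.testBit_xor, hb, hsi]; rfl
          have : ¬ (i ^^^ s < 2 ^ k) := fun h =>
            absurd hbit (by rw [(lt_two_pow_iff _ _).mp h k (le_refl k)]; simp)
          simp [hs, this]
        · simp [hs]
      have hsub : (s &&& i = s) ↔ (s &&& (i ^^^ 2 ^ k) = s) := by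
        rw [submask_iff, submask_iff]
        constructor
        · intro h j hj
          rw [hi'bit j]
          have : ¬ (k = j) := fun e => by rw [← e, hsi] at hj; exact Bool.false_ne_true hj
          simp [this, h j hj]
        · intro h j hj
          have hthis := h j hj
          rw [hi'bit j] at hthis
          by_cases hkj : k = j
          · rw [← hkj, hsi] at hj; exact absurd hj Bool.false_ne_true
          · rw [decide_eq_false hkj] at hthis
            simpa using hthis
      have hbnd : (i ^^^ s < 2 ^ (k + 1)) ↔ ((i ^^^ 2 ^ k) ^^^ s < 2 ^ k) := by
        have hxbit : ∀ j, ((i ^^^ 2 ^ k) ^^^ s).testBit j = (((i ^^^ s).testBit j) ^^ decide (k = j)) := by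
          intro j
          rw [Nat.testBit_xor, hi'bit j, Nat.testBit_xor]
          cases (i.testBit j) <;> cases (s.testBit j) <;> cases (decide (k = j)) <;> rfl
        constructor
        · intro h
          apply (lt_two_pow_iff _ _).mpr
          intro j hj
          rcases Nat.eq_or_lt_of_le hj with hj' | hj'
          · rw [← hj', hxbit k, Nat.testBit_xor, hb, hsi]
            simp
          · rw [hxbit j, (lt_two_pow_iff _ _).mp h j (by omega)]
            simp [decide_eq_false (by omega : ¬ (k = j))]
        · intro h
          apply (lt_two_pow_iff _ _).mpr
          intro j hj
          have hthis := (lt_two_pow_iff _ _).mp h j (by omega)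
          rw [hxbit j, decide_eq_false (by omega : ¬ (k = j))] at hthis
          simpa using hthis
      rw [hp1, Bool.false_or]
      by_cases hs : s &&& i = s
      · have hs' : s &&& (i ^^^ 2 ^ k) = s := hsub.mp hs
        have e1 : (s &&& i == s) = true := by simpa using hs
        have e2 : (s &&& (i ^^^ 2 ^ k) == s) = true := by simpa using hs'
        rw [e1, e2, Bool.true_and, Bool.true_and, decide_eq_decide]
        exact hbnd
      · have hs' : ¬ (s &&& (i ^^^ 2 ^ k) = s) := fun h => hs (hsub.mpr h)
        have e1 : (s &&& i == s) = false := by simpa using hs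
        have e2 : (s &&& (i ^^^ 2 ^ k) == s) = false := by simpa using hs'
        rw [e1, e2, Bool.false_and, Bool.false_and]
    · -- s has bit k set: p2 s = false, p s = p1 s
      have hp2 : ((s &&& (i ^^^ 2 ^ k) == s) && decide ((i ^^^ 2 ^ k) ^^^ s < 2 ^ k)) = false := by
        by_cases hs : s &&& (i ^^^ 2 ^ k) = s
        · have := (submask_iff _ _).mp hs k hsi
          rw [hi'bit k] at this
          simp [hb] at this
        · simp [hs]
      by_cases hs : s &&& i = s
      · have hiff : i ^^^ s < 2 ^ (k + 1) ↔ i ^^^ s < 2 ^ k := by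
          constructor
          · intro h
            apply (lt_two_pow_iff _ _).mpr
            intro j hj
            rcases Nat.eq_or_lt_of_le hj with hj' | hj'
            · rw [← hj', Nat.testBit_xor, hb, hsi]; rfl
            · exact (lt_two_pow_iff _ _).mp h j (by omega)
          · intro h
            have : (2:Nat) ^ k ≤ 2 ^ (k + 1) := Nat.pow_le_pow_right (by norm_num) (by omega)
            omega
        rw [hp2, Bool.or_false]
        have e1 : (s &&& i == s) = true := by simpa using hs
        rw [e1, Bool.true_and, Bool.true_and, decide_eq_decide]
        exact hiff
      · rw [hp2, Bool.or_false]
        have e1 : (s &&& i == s) = false := by simpa using hs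
        rw [e1, Bool.false_and, Bool.false_and]
  · -- disjoint
    intro s ⟨h1, h2⟩
    have hs1 : s &&& i = s := by
      cases hx : (s &&& i == s)
      · rw [hx] at h1; simp at h1
      · simpa using hx
    have hlt : i ^^^ s < 2 ^ k := by
      have := h1
      simp [hs1] at this
      exact this
    have hsi : s.testBit k = true := by
      have hbitf : (i ^^^ s).testBit k = false := by
        rw [(lt_two_pow_iff _ _).mp hlt k (le_refl k)]
      rw [Nat.testBit_xor, hb] at hbitf
      cases hsk : s.testBit k
      · rw [hsk] at hbitf; simp at hbitf
      · rfl
    have hs2 : s &&& (i ^^^ 2 ^ k) = s := by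
      cases hx : (s &&& (i ^^^ 2 ^ k) == s)
      · rw [hx] at h2; simp at h2
      · simpa using hx
    have := (submask_iff _ _).mp hs2 k hsi
    rw [Nat.testBit_xor, hb, Nat.testBit_two_pow] at this
    simp at this

-- pass lemmas ------------------------------------------------------------
theorem getD_set_self (l : List Int) (i : Nat) (a : Int) (h : i < l.length) :
    (l.set i a).getD i 0 = a := by
  simp [List.getD, h]

theorem getD_set_ne (l : List Int) (i j : Nat) (a : Int) (h : j ≠ i) :
    (l.set i a).getD j 0 = l.getD j 0 := by
  simp [List.getD, List.getElem?_set_ne (fun e => h e.symm)]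

theorem passAux_length (cs : List Int) (step m : Nat) :
    ((List.range m).foldl
      (fun acc mask =>
        if mask &&& step ≠ 0 then
          acc.set mask (PySem.Int.bxor (acc.getD mask 0) (acc.getD (mask ^^^ step) 0))
        else acc) cs).length = cs.length := by
  induction m with
  | zero => rfl
  | succ m ih =>
    rw [List.range_succ, List.foldl_append, List.foldl_cons, List.foldl_nil]
    split
    · rw [List.length_set]; exact ih
    · exact ih

theorem passAux_getD (cs : List Int) (step : Nat)
    (hstep : ∀ mask, mask &&& step ≠ 0 → (mask ^^^ step) &&& step = 0)
    (m : Nat) : m ≤ cs.length → ∀ (i : Nat),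
    ((List.range m).foldl
      (fun acc mask =>
        if mask &&& step ≠ 0 then
          acc.set mask (PySem.Int.bxor (acc.getD mask 0) (acc.getD (mask ^^^ step) 0))
        else acc) cs).getD i 0 =
      if i < m ∧ i &&& step ≠ 0 then
        PySem.Int.bxor (cs.getD i 0) (cs.getD (i ^^^ step) 0)
      else cs.getD i 0 := by
  induction m with
  | zero => intro _ i; simp
  | succ m ih =>
    intro hm i
    have hm' : m ≤ cs.length := by omega
    rw [List.range_succ, List.foldl_append, List.foldl_cons, List.foldl_nil]
    by_cases hms : m &&& step ≠ 0
    · rw [if_pos hms]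
      have hcur : _ := ih hm' m
      have hread : _ := ih hm' (m ^^^ step)
      rw [if_neg (by omega)] at hcur
      rw [if_neg (by simp [hstep m hms])] at hread
      by_cases hi : i = m
      · subst hi
        rw [getD_set_self _ _ _ (by rw [passAux_length]; omega)]
        rw [hcur, hread, if_pos ⟨by omega, hms⟩]
      · rw [getD_set_ne _ _ _ _ hi]
        rw [ih hm' i]
        by_cases hcond : i < m ∧ i &&& step ≠ 0
        · rw [if_pos hcond, if_pos ⟨by omega, hcond.2⟩]
        · rw [if_neg hcond, if_neg (fun ⟨h1,h2⟩ => hcond ⟨by omega, h2⟩)]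
    · rw [if_neg hms]
      rw [ih hm' i]
      by_cases hcond : i < m ∧ i &&& step ≠ 0
      · rw [if_pos hcond, if_pos ⟨by omega, hcond.2⟩]
      · rw [if_neg hcond]
        rw [if_neg (fun ⟨h1, h2⟩ => hcond ⟨by
          by_cases h : i = m
          · exact absurd (h ▸ h2) (by simpa using hms)
          · omega, h2⟩)]

-- effect of one pass on G and the loop invariant
theorem anfLoop_congr (cs : List Int) (n s1 s2 : Nat) (h12 : s1 = s2) (h1 : 0 < s1) :
    anfLoop cs n s1 h1 = anfLoop cs n s2 (h12 ▸ h1) := by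
  subst h12; rfl

theorem pass_G (v : List Int) (k : Nat) :
    anfPass ((List.range v.length).map (G v k)) v.length (2 ^ k) =
      (List.range v.length).map (G v (k + 1)) := by
  have hlen : ((List.range v.length).map (G v k)).length = v.length := by simp
  have hstep : ∀ mask, mask &&& 2 ^ k ≠ 0 → (mask ^^^ 2 ^ k) &&& 2 ^ k = 0 := by
    intro m hm
    have hbm := (and_two_pow_ne_zero_iff m k).mp hm
    by_contra hc
    have := (and_two_pow_ne_zero_iff _ k).mp hc
    rw [Nat.testBit_xor, hbm, Nat.testBit_two_pow] at this
    simp at this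
  unfold anfPass
  apply List.ext_getElem
  · rw [passAux_length]; simp
  · intro i h1 h2
    have hi : i < v.length := by simpa using h2
    rw [← List.getD_eq_getElem _ 0 h1,
      passAux_getD _ _ hstep v.length (by omega) i]
    simp only [List.getElem_map, List.getElem_range]
    by_cases hcase : i &&& 2 ^ k ≠ 0
    · rw [if_pos ⟨hi, hcase⟩]
      have hbit := (and_two_pow_ne_zero_iff i k).mp hcase
      have hxlt : i ^^^ 2 ^ k < v.length := by
        have := xor_two_pow_lt hbit
        omega
      rw [PySem.List.getD_map_range _ _ _ _ hi, PySem.List.getD_map_range _ _ _ _ hxlt]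
      exact (G_succ_bit_true v k i hbit).symm
    · rw [if_neg (fun h => hcase h.2), PySem.List.getD_map_range _ _ _ _ hi]
      have hbit : i.testBit k = false := by
        cases hb : i.testBit k
        · rfl
        · exact absurd ((and_two_pow_ne_zero_iff i k).mpr hb) hcase
      exact (G_succ_bit_false v k i hbit).symm

theorem loop_inv (v : List Int) : ∀ (d k : Nat), d = v.length - 2 ^ k →
    anfLoop ((List.range v.length).map (G v k)) v.length (2 ^ k) (Nat.two_pow_pos k) =
      (List.range v.length).map (anfDirect v) := by
  intro d
  induction d using Nat.strong_induction_on with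
  | _ d ih =>
    intro k hd
    rw [anfLoop]
    by_cases hs : 2 ^ k < v.length
    · rw [dif_pos hs, pass_G]
      rw [anfLoop_congr _ _ _ _ (by rw [Nat.shiftLeft_eq, pow_one, pow_succ] : 2 ^ k <<< 1 = 2 ^ (k + 1))]
      refine ih (v.length - 2 ^ (k + 1)) ?_ (k + 1) rfl
      have h2 : (2:Nat) ^ k < 2 ^ (k + 1) := Nat.pow_lt_pow_right (by norm_num) (by omega)
      omega
    · rw [dif_neg hs]
      apply List.ext_getElem
      · simp
      · intro i h1 h2
        simp only [List.getElem_map, List.getElem_range]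
        exact G_final v k i (by simpa using h1) (by omega)

-- ===== VERDICT (by name: the statement is the Claim_ definition above) =====
theorem anf_coefficients_py_spec : Claim_equal_anf_coefficients_py := by
  intro vector _
  unfold Spec_anf_coefficients_py anf_coefficients_py anf_coefficients_py_alt
  have h0 := loop_inv vector (vector.length - 2 ^ 0) 0 rfl
  rw [G_zero] at h0
  simpa using h0
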